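-- pv_equiv track=rewrite | github.com/dseum2023/CSE-2050 | Week 3/Flipping Patties/FlippingPatties.py | minimum_cooks_needed
-- ===== SOURCE A (Python) =====
-- def minimum_cooks_needed(orders):
--
--     timeline = {}
--
--     for d, t in orders:
--         start_time = t - 2 * d
--         flip_time = t - d
--         serve_time = t
--
--         timeline[start_time] = timeline.get(start_time, 0) + 1
--
--         timeline[flip_time] = timeline.get(flip_time, 0) + 1
--
--         timeline[serve_time] = timeline.get(serve_time, 0) + 1
--
--     max_actions_per_second = max(timeline.values())
--
--     return (max_actions_per_second + 1) // 2
-- ===== SOURCE B (Python) =====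
-- def minimum_cooks_needed(orders):
--     events = sorted(t - k * d for d, t in orders for k in (2, 1, 0))
--     best = run = 0
--     prev = None
--     for x in events:
--         run = run + 1 if x == prev else 1
--         prev = x
--         if run > best:
--             best = run
--     return (best + 1) // 2
-- ===== Notes on version B (the rewrite author's own statement) =====
-- stated objective: alternative
-- what changed: Replaced the per-timestamp hash-counter dict (then max over its values) by flattening all event times, sorting them, and a single scan that tracks the longest run of equal timestamps.
import Mathlib
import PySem

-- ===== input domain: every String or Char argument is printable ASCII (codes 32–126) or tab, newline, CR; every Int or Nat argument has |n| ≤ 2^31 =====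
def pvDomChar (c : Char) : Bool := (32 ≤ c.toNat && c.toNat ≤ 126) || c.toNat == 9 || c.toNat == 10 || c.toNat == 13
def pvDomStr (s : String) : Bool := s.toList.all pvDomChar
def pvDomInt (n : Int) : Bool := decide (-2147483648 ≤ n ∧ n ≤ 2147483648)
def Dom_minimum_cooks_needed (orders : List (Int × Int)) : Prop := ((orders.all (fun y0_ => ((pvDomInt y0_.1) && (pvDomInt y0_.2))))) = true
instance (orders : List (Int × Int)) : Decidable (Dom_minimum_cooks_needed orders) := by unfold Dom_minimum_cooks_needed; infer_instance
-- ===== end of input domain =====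

-- B replaces A's per-timestamp counter dict (then max over its values) by sorting the flattened
-- event times and scanning once for the longest run of equal timestamps (alternative algorithm).

-- ===== PORT A =====
-- one iteration of A's 'for d, t in orders' loop over the timeline dict
def aStep (tl : PySem.Dict Int Int) (dt : Int × Int) : PySem.Dict Int Int :=
  let d := dt.1
  let t := dt.2
  let start_time := t - 2 * d
  let flip_time := t - d
  let serve_time := t
  let tl := tl.insert start_time (tl.getD start_time 0 + 1)
  let tl := tl.insert flip_time (tl.getD flip_time 0 + 1)
  tl.insert serve_time (tl.getD serve_time 0 + 1)

def minimum_cooks_needed (orders : List (Int × Int)) : Int :=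
  let timeline := orders.foldl aStep PySem.Dict.empty
  match PySem.List.max? timeline.values (fun y => y) with
  | some max_actions_per_second => PySem.Int.floordiv (max_actions_per_second + 1) 2
  | none => 0  -- unreachable under Pre_: Python's max() raises ValueError on the empty dict

-- ===== PORT B =====
-- one iteration of B's scan: state = (best, run, prev)
def bStep (st : Int × Int × Option Int) (x : Int) : Int × Int × Option Int :=
  let run := if some x == st.2.2 then st.2.1 + 1 else 1
  let best := if run > st.1 then run else st.1
  (best, run, some x)

def minimum_cooks_needed_alt (orders : List (Int × Int)) : Int :=
  let events := PySem.List.sorted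
    (orders.flatMap (fun dt => [(2 : Int), 1, 0].map (fun k => dt.2 - k * dt.1)))
    (fun x => x) false
  let r := events.foldl bStep ((0 : Int), (0 : Int), (none : Option Int))
  PySem.Int.floordiv (r.1 + 1) 2

-- ===== PRECONDITION & SPEC =====
-- Pre_ excludes only the empty list, on which A's max() raises ValueError.
def Pre_minimum_cooks_needed (orders : List (Int × Int)) : Prop := orders ≠ []
instance (orders : List (Int × Int)) : Decidable (Pre_minimum_cooks_needed orders) := by unfold Pre_minimum_cooks_needed; infer_instance
def pvWitness_minimum_cooks_needed : (List (Int × Int)) := [(1, 2)]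

def Spec_minimum_cooks_needed (orders : List (Int × Int)) (out : Int) : Prop := out = minimum_cooks_needed_alt orders
instance (orders : List (Int × Int)) (out : Int) : Decidable (Spec_minimum_cooks_needed orders out) := by unfold Spec_minimum_cooks_needed; infer_instance

-- ===== CLAIM (what is proved, stated in full; the proofs are below) =====
def Claim_equal_minimum_cooks_needed : Prop := ∀ (orders : List (Int × Int)), Dom_minimum_cooks_needed orders → Pre_minimum_cooks_needed orders → Spec_minimum_cooks_needed orders (minimum_cooks_needed orders)

-- ===== LEMMAS AND PROOFS =====

-- the per-order triple of event times, as A computes it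
def evs (dt : Int × Int) : List Int := [dt.2 - 2 * dt.1, dt.2 - dt.1, dt.2]

-- A's dict fold over orders is the counter of the flattened event list
lemma aFold_eq_counter (orders : List (Int × Int)) :
    orders.foldl aStep PySem.Dict.empty = PySem.Dict.counter (orders.flatMap evs) := by
  suffices h : ∀ (l : List (Int × Int)) (d : PySem.Dict Int Int),
      l.foldl aStep d = (l.flatMap evs).foldl (fun d x => d.insert x (d.getD x 0 + 1)) d by
    rw [h, PySem.Dict.foldl_insert_getD_add_one_eq_counter]
  intro l
  induction l with
  | nil => intro d; simp
  | cons hd tl ih =>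
      intro d
      simp only [List.flatMap_cons, List.foldl_append, List.foldl_cons, ih, List.foldl_nil,
        aStep, evs]

-- running bStep over a block of equal elements continuing the current run
lemma bFold_run (n : Nat) (a best run : Int) (h : run ≤ best) :
    (List.replicate n a).foldl bStep (best, run, some a) =
      (if run + n > best then run + n else best, run + n, some a) := by
  induction n generalizing best run with
  | zero =>
      simp only [List.replicate_zero, List.foldl_nil, Nat.cast_zero, add_zero]
      rw [if_neg (by omega)]
  | succ m ih =>
      rw [List.replicate_succ, List.foldl_cons]
      have hst : bStep (best, run, some a) a =
          (if run + 1 > best then run + 1 else best, run + 1, some a) := by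
        simp [bStep]
      rw [hst, ih (if run + 1 > best then run + 1 else best) (run + 1) (by split <;> omega)]
      push_cast
      simp only [Prod.mk.injEq]
      refine ⟨?_, ?_, by trivial⟩ <;> omega

-- running bStep over a fresh block of n copies of a
lemma bFold_block (n : Nat) (a best run : Int) (p : Option Int)
    (hp : p ≠ some a) (h : run ≤ best) (hn : 1 ≤ n) :
    (List.replicate n a).foldl bStep (best, run, p) =
      (if (n : Int) > best then (n : Int) else best, (n : Int), some a) := by
  cases n with
  | zero => omega
  | succ m =>
      rw [List.replicate_succ, List.foldl_cons]
      have hbeq : (some a == p) = false := by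
        rcases p with _ | v
        · rfl
        · have hv : v ≠ a := fun hh => hp (by rw [hh])
          simp [Ne.symm hv]
      have hst : bStep (best, run, p) a =
          (if 1 > best then 1 else best, 1, some a) := by
        simp [bStep, hbeq]
      rw [hst, bFold_run m a (if 1 > best then 1 else best) 1 (by split <;> omega)]
      push_cast
      simp only [Prod.mk.injEq]
      refine ⟨?_, ?_, by trivial⟩ <;> omega

-- a sorted list whose minimum is a splits into the block of a's and the rest
lemma min_decomp (s : List Int) (a : Int) (hmin : ∀ x ∈ s, a ≤ x)
    (hs : List.Pairwise (· ≤ ·) s) :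
    s = List.replicate (s.count a) a ++ s.filter (fun x => x != a) := by
  induction s with
  | nil => simp
  | cons b t ih =>
      rcases hs with _ | ⟨hb, ht⟩
      by_cases hba : b = a
      · subst hba
        have h1 : ∀ x ∈ t, b ≤ x := fun x hx => hb x hx
        simp only [List.count_cons_self, List.replicate_succ, List.filter_cons,
          bne_self_eq_false, List.cons_append]
        rw [if_neg (by simp)]
        exact congrArg (b :: ·) (ih h1 ht)
      · have hnot : a ∉ b :: t := by
          intro hmem
          rcases List.mem_cons.mp hmem with h | h
          · exact hba h.symm
          · have := hb a h
            have := hmin b (by simp)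
            omega
        rw [List.count_eq_zero.mpr hnot, List.replicate_zero, List.nil_append,
          List.filter_eq_self.mpr]
        intro x hx
        simp only [bne_iff_ne, ne_eq]
        exact fun hxa => hnot (hxa ▸ hx)

-- Set.add into an accumulator starting with a never touches a leading a the tail does not contain
lemma ofList_prepend_not_mem (a : Int) (l s : List Int) (hl : a ∉ l) :
    l.foldl PySem.Set.add (a :: s) = a :: l.foldl PySem.Set.add s := by
  induction l generalizing s with
  | nil => rfl
  | cons x t ih =>
      simp only [List.foldl_cons]
      have hxa : x ≠ a := fun h => hl (h ▸ List.mem_cons_self)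
      have : PySem.Set.add (a :: s) x = a :: PySem.Set.add s x := by
        simp [PySem.Set.add, PySem.Set.contains, hxa]
        split <;> rfl
      rw [this, ih _ (fun h => hl (List.mem_cons_of_mem _ h))]

-- PySem.Set.ofList of a block of a's followed by an a-free rest
lemma ofList_block (a : Int) (n : Nat) (rest : List Int) (hn : 1 ≤ n) (hr : a ∉ rest) :
    PySem.Set.ofList (List.replicate n a ++ rest) = a :: PySem.Set.ofList rest := by
  rw [PySem.Set.ofList_eq_foldl, List.foldl_append]
  have h1 : (List.replicate n a).foldl PySem.Set.add [] = [a] := by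
    cases n with
    | zero => omega
    | succ m =>
        rw [List.replicate_succ, List.foldl_cons]
        have : PySem.Set.add [] a = [a] := rfl
        rw [this]
        induction m with
        | zero => rfl
        | succ k ihk =>
            rw [List.replicate_succ, List.foldl_cons]
            have : PySem.Set.add [a] a = [a] := by simp [PySem.Set.add, PySem.Set.contains]
            rw [this]
            exact ihk (by omega)
  rw [h1, ofList_prepend_not_mem a rest [] hr, PySem.Set.ofList_eq_foldl]

-- main invariant: B's scan over a sorted list computes the maximal multiplicity
lemma bFold_main_aux : ∀ (N : Nat) (s : List Int), s.length ≤ N → List.Pairwise (· ≤ ·) s →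
    ∀ (best run : Int) (p : Option Int),
      (∀ x ∈ s, ∀ q, p = some q → q < x) → run ≤ best →
      (s.foldl bStep (best, run, p)).1 =
        ((PySem.Set.ofList s).map (fun x => (s.count x : Int))).foldl max best := by
  intro N
  induction N with
  | zero =>
      intro s hlen _ best run p _ _
      have hse : s = [] := List.eq_nil_of_length_eq_zero (Nat.le_zero.mp hlen)
      subst hse; simp
  | succ N ih =>
      intro s hlen hs best run p hp h
      match s, hs with
      | [], _ => simp
      | a :: t, hs =>
        have hmin : ∀ x ∈ a :: t, a ≤ x := by
          intro x hx
          rcases List.mem_cons.mp hx with rfl | hx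
          · exact le_refl x
          · rcases hs with _ | ⟨hb, _⟩
            exact hb x hx
        have hdec := min_decomp (a :: t) a hmin hs
        set n := (a :: t).count a with hn
        set rest := (a :: t).filter (fun x => x != a) with hrest
        have hn1 : 1 ≤ n := List.count_pos_iff.mpr (by simp)
        have hanr : a ∉ rest := by simp [hrest, List.mem_filter]
        have hrlen : rest.length ≤ N := by
          have hle := congrArg List.length hdec
          simp only [List.length_append, List.length_replicate, List.length_cons] at hle hlen
          omega
        have hrs : List.Pairwise (· ≤ ·) rest := hs.sublist List.filter_sublist
        have hrestmem : ∀ x ∈ rest, a < x := by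
          intro x hx
          have hx' := List.mem_filter.mp (hrest ▸ hx)
          have := hmin x hx'.1
          have hne : x ≠ a := by simpa using hx'.2
          omega
        have hpa : p ≠ some a := by
          intro hpe
          have := hp a (by simp) a hpe
          omega
        conv_lhs => rw [hdec]
        rw [List.foldl_append, bFold_block n a best run p hpa h hn1]
        rw [ih rest hrlen hrs _ n (some a)
          (fun x hx q hq => by injection hq with hq; subst hq; exact hrestmem x hx)
          (by split <;> omega)]
        conv_rhs => rw [hdec]
        rw [ofList_block a n rest hn1 hanr, List.map_cons, List.foldl_cons]
        have hca : ((List.replicate n a ++ rest).count a : Int) = (n : Int) := by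
          rw [List.count_append, List.count_replicate, if_pos (by simp),
            List.count_eq_zero.mpr hanr]
          simp
        rw [hca]
        have hinit : (if (n : Int) > best then (n : Int) else best) = max best (n : Int) := by
          split <;> omega
        rw [hinit]
        congr 1
        apply List.map_congr_left
        intro x hx
        have hxr : x ∈ rest := by
          have := (PySem.Set.mem_ofList _ _).mp hx
          exact this
        have hxa : x ≠ a := fun hh => hanr (hh ▸ hxr)
        rw [List.count_append, List.count_replicate, if_neg (by simpa using Ne.symm hxa)]
        simp

-- A and B agree on every non-empty input
lemma ab_eq (orders : List (Int × Int)) (hpre : orders ≠ []) :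
    minimum_cooks_needed orders = minimum_cooks_needed_alt orders := by
  have hfl : (orders.flatMap (fun dt => [(2 : Int), 1, 0].map (fun k => dt.2 - k * dt.1)))
      = orders.flatMap evs := by
    have hfun : (fun dt : Int × Int => [(2 : Int), 1, 0].map (fun k => dt.2 - k * dt.1)) = evs := by
      funext dt
      simp [evs]
    rw [hfun]
  set ev := orders.flatMap evs with hev
  have hevne : ev ≠ [] := by
    cases orders with
    | nil => exact absurd rfl hpre
    | cons o os => simp [hev, evs]
  -- A side
  have hvals : (PySem.Dict.counter ev).values
      = (PySem.Set.ofList ev).map (fun k => (ev.count k : Int)) := by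
    simp only [PySem.Dict.values, PySem.Dict.items_counter, List.map_map]
    rfl
  obtain ⟨k, ks, hks⟩ : ∃ k ks, PySem.Set.ofList ev = k :: ks := by
    cases hof : PySem.Set.ofList ev with
    | nil =>
        exfalso
        rcases List.exists_mem_of_ne_nil ev hevne with ⟨x, hx⟩
        have := (PySem.Set.mem_ofList _ _).mpr hx
        rw [hof] at this
        exact absurd this (List.not_mem_nil)
    | cons k ks => exact ⟨k, ks, rfl⟩
  have hkev : k ∈ ev := (PySem.Set.mem_ofList _ _).mp (hks ▸ List.mem_cons_self)
  have hkpos : 1 ≤ (ev.count k : Int) := by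
    have := List.count_pos_iff.mpr hkev
    omega
  -- B side
  set s := PySem.List.sorted ev (fun x => x) false with hsdef
  have hperm : s.Perm ev := PySem.List.sorted_perm ev (fun x => x) false
  have hpair : List.Pairwise (· ≤ ·) s := by
    have := PySem.List.sorted_pairwise (xs := ev) (key := fun x => x)
    simpa using this
  have hmain := bFold_main_aux s.length s (le_refl _) hpair 0 0 none
    (fun x _ q hq => by cases hq) (le_refl 0)
  have hcnt : (fun x => (s.count x : Int)) = (fun x => (ev.count x : Int)) := by
    funext x
    rw [hperm.count_eq]
  have hofperm : (PySem.Set.ofList s).Perm (PySem.Set.ofList ev) := by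
    rw [List.perm_ext_iff_of_nodup (PySem.Set.nodup_ofList _) (PySem.Set.nodup_ofList _)]
    intro x
    rw [PySem.Set.mem_ofList, PySem.Set.mem_ofList, hperm.mem_iff]
  have hfold : ((PySem.Set.ofList s).map (fun x => (ev.count x : Int))).foldl max 0
      = ((PySem.Set.ofList ev).map (fun x => (ev.count x : Int))).foldl max 0 :=
    List.Perm.foldl_eq (hofperm.map _) 0
  -- assemble
  show (match PySem.List.max? (orders.foldl aStep PySem.Dict.empty).values (fun y => y) with
    | some m => PySem.Int.floordiv (m + 1) 2
    | none => 0) = _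
  rw [aFold_eq_counter, hvals, hks, List.map_cons, PySem.List.max?_id_cons]
  show PySem.Int.floordiv ((ks.map _).foldl max _ + 1) 2 = _
  unfold minimum_cooks_needed_alt
  rw [hfl]
  simp only []
  rw [hmain, hcnt, hfold, hks, List.map_cons, List.foldl_cons,
    max_eq_right (le_trans (by omega) hkpos)]

-- ===== VERDICT (by name: the statement is the Claim_ definition above) =====
theorem minimum_cooks_needed_spec : Claim_equal_minimum_cooks_needed := by
  intro orders _ hpre
  unfold Spec_minimum_cooks_needed
  exact ab_eq orders hpre
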